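-- pv_equiv track=rewrite | github.com/LumateDev/ContextCollector | scanner.py | _glob_to_regex
-- ===== SOURCE A (Python) =====
-- def _glob_to_regex(pattern: str) -> str:
--     result = ''
--     i = 0
--     while i < len(pattern):
--         c = pattern[i]
--         if c == '*':
--             if i + 1 < len(pattern) and pattern[i + 1] == '*':
--                 if i + 2 < len(pattern) and pattern[i + 2] == '/':
--                     result += '(?:.*/)?'
--                     i += 3
--                     continue
--                 else:
--                     result += '.*'
--                     i += 2
--                     continue
--             else:
--                 result += '[^/]*'
--         elif c == '?':
--             result += '[^/]'
--         elif c in r'\.^$+{}()|':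
--             result += '\\' + c
--         else:
--             result += c
--         i += 1
--     return result
-- ===== SOURCE B (Python) =====
-- import re
--
-- _TOKEN = re.compile(r'\*\*/|\*\*|\*|\?|[\\.^$+{}()|]')
-- _TABLE = {'**/': '(?:.*/)?', '**': '.*', '*': '[^/]*', '?': '[^/]'}
--
-- def _glob_to_regex(pattern: str) -> str:
--     def repl(m):
--         tok = m.group(0)
--         return _TABLE.get(tok, '\\' + tok)
--     return _TOKEN.sub(repl, pattern)
-- ===== Notes on version B (the rewrite author's own statement) =====
-- stated objective: faster
-- what changed: Replaced A's manual while-loop with index lookahead, per-character branching and repeated string concatenation by a single compiled alternation regex ('**/'|'**'|'*'|'?'|special char, longest first) applied with re.sub and a token-to-replacement dispatch table; unmatched characters pass through untouched.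
import Mathlib
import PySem

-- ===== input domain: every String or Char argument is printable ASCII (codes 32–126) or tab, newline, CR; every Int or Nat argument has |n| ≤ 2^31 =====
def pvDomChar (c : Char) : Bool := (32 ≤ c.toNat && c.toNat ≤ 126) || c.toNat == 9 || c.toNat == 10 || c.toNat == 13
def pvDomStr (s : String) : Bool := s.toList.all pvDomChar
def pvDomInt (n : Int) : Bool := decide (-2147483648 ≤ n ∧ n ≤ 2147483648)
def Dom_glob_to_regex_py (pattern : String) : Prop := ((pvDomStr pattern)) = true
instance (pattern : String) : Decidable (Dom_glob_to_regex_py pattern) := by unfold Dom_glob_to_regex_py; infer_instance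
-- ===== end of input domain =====

-- B replaces A's manual index-with-lookahead scan by regex-style tokenization (longest-first
-- alternation '**/' | '**' | '*' | '?' | special char) with a dispatch table; objective: idiomatic.

-- ===== PORT A =====
-- A's while-loop over index i, accumulating `result` (built here as the prefix of the recursion).
def globAgo (s : List Char) (i : Nat) : List Char :=
  if h : i < s.length then
    let c := s[i]
    if c = '*' then
      if h1 : i + 1 < s.length then
        if s[i+1] = '*' then
          if h2 : i + 2 < s.length then
            if s[i+2] = '/' then "(?:.*/)?".toList ++ globAgo s (i+3)
            else ".*".toList ++ globAgo s (i+2)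
          else ".*".toList ++ globAgo s (i+2)
        else "[^/]*".toList ++ globAgo s (i+1)
      else "[^/]*".toList ++ globAgo s (i+1)
    else if c = '?' then "[^/]".toList ++ globAgo s (i+1)
    else if c ∈ "\\.^$+{}()|".toList then '\\' :: c :: globAgo s (i+1)
    else c :: globAgo s (i+1)
  else []
termination_by s.length - i

def glob_to_regex_py (pattern : String) : String := String.ofList (globAgo pattern.toList 0)

-- ===== PORT B =====
-- B's token regex applied by re.sub: at each position the alternatives are tried in order
-- ('**/' before '**' before '*' before '?' before a special char); an unmatched character
-- passes through; the dispatch table maps each matched token to its replacement.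
def tokSub : List Char → List Char
  | '*' :: '*' :: '/' :: r => "(?:.*/)?".toList ++ tokSub r
  | '*' :: '*' :: r => ".*".toList ++ tokSub r
  | '*' :: r => "[^/]*".toList ++ tokSub r
  | '?' :: r => "[^/]".toList ++ tokSub r
  | c :: r => (if c ∈ "\\.^$+{}()|".toList then ['\\', c] else [c]) ++ tokSub r
  | [] => []

def glob_to_regex_py_alt (pattern : String) : String := String.ofList (tokSub pattern.toList)

-- ===== PRECONDITION & SPEC =====
def Spec_glob_to_regex_py (pattern : String) (out : String) : Prop := out = glob_to_regex_py_alt pattern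
instance (pattern : String) (out : String) : Decidable (Spec_glob_to_regex_py pattern out) := by unfold Spec_glob_to_regex_py; infer_instance

-- ===== CLAIM (what is proved, stated in full; the proofs are below) =====
def Claim_equal_glob_to_regex_py : Prop := ∀ (pattern : String), Dom_glob_to_regex_py pattern → Spec_glob_to_regex_py pattern (glob_to_regex_py pattern)

-- ===== LEMMAS AND PROOFS =====

lemma tok_nil : tokSub [] = [] := by rw [tokSub]

lemma tok_ss_slash (r : List Char) : tokSub ('*' :: '*' :: '/' :: r) = "(?:.*/)?".toList ++ tokSub r := by
  rw [tokSub]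

lemma tok_ss (c : Char) (r : List Char) (hc : c ≠ '/') :
    tokSub ('*' :: '*' :: c :: r) = ".*".toList ++ tokSub (c :: r) := by
  rw [tokSub.eq_def]
  split
  · simp_all
  · simp_all
  · next hne heq => injection heq with ha hb; exact (hne _ hb.symm).elim
  · simp_all
  · next h1 h2 heq => injection heq with ha hb; exact absurd ha.symm h1
  · simp_all

lemma tok_ss_nil : tokSub ['*', '*'] = ".*".toList := by
  rw [tokSub] <;> simp [tok_nil]

lemma tok_s (c : Char) (r : List Char) (hc : c ≠ '*') :
    tokSub ('*' :: c :: r) = "[^/]*".toList ++ tokSub (c :: r) := by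
  rw [tokSub.eq_def]
  split
  · simp_all
  · simp_all
  · simp_all
  · simp_all
  · next h1 h2 heq => injection heq with ha hb; exact absurd ha.symm h1
  · simp_all

lemma tok_s_nil : tokSub ['*'] = "[^/]*".toList := by
  rw [tokSub] <;> simp [tok_nil]

lemma tok_q (r : List Char) : tokSub ('?' :: r) = "[^/]".toList ++ tokSub r := by
  rw [tokSub]

lemma tok_other (c : Char) (r : List Char) (h1 : c ≠ '*') (h2 : c ≠ '?') :
    tokSub (c :: r) = (if c ∈ "\\.^$+{}()|".toList then ['\\', c] else [c]) ++ tokSub r := by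
  rw [tokSub.eq_def]
  split
  · simp_all
  · simp_all
  · simp_all
  · simp_all
  · next heq => injection heq with ha hb; subst ha; subst hb; simp
  · simp_all

lemma globAgo_eq_tokSub : ∀ (n : Nat) (s : List Char) (i : Nat), s.length - i ≤ n →
    globAgo s i = tokSub (s.drop i) := by
  intro n
  induction n with
  | zero =>
    intro s i hle
    rw [globAgo]
    have h : ¬ i < s.length := by omega
    simp [h, List.drop_of_length_le (by omega : s.length ≤ i), tok_nil]
  | succ n ih =>
    intro s i hle
    rw [globAgo]
    by_cases h : i < s.length
    · have hd : s.drop i = s[i] :: s.drop (i + 1) := List.drop_eq_getElem_cons h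
      simp only [h, dif_pos]
      by_cases hstar : s[i] = '*'
      · by_cases h1 : i + 1 < s.length
        · have hd1 : s.drop (i + 1) = s[i+1] :: s.drop (i + 2) := List.drop_eq_getElem_cons h1
          by_cases hstar2 : s[i+1] = '*'
          · by_cases h2 : i + 2 < s.length
            · have hd2 : s.drop (i + 2) = s[i+2] :: s.drop (i + 3) := List.drop_eq_getElem_cons h2
              by_cases hsl : s[i+2] = '/'
              · rw [if_pos hstar, dif_pos h1, if_pos hstar2, dif_pos h2, if_pos hsl,
                    ih s (i+3) (by omega), hd, hd1, hd2, hstar, hstar2, hsl, tok_ss_slash]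
              · rw [if_pos hstar, dif_pos h1, if_pos hstar2, dif_pos h2, if_neg hsl,
                    ih s (i+2) (by omega), hd, hd1, hd2, hstar, hstar2, tok_ss _ _ hsl]
            · have hd2 : s.drop (i + 2) = [] := List.drop_of_length_le (by omega)
              rw [if_pos hstar, dif_pos h1, if_pos hstar2, dif_neg h2,
                  ih s (i+2) (by omega), hd, hd1, hd2, hstar, hstar2, tok_nil, tok_ss_nil]
              simp
          · rw [if_pos hstar, dif_pos h1, if_neg hstar2,
                ih s (i+1) (by omega), hd, hd1, hstar, tok_s _ _ hstar2]
        · have hd1 : s.drop (i + 1) = [] := List.drop_of_length_le (by omega)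
          rw [if_pos hstar, dif_neg h1, ih s (i+1) (by omega), hd, hd1, hstar, tok_nil, tok_s_nil]
          simp
      · by_cases hq : s[i] = '?'
        · rw [if_neg hstar, if_pos hq, ih s (i+1) (by omega), hd, hq, tok_q]
        · rw [if_neg hstar, if_neg hq, ih s (i+1) (by omega), hd, tok_other _ _ hstar hq]
          split_ifs <;> simp
    · have hd : s.drop i = [] := List.drop_of_length_le (by omega)
      simp [h, hd, tok_nil]

-- ===== VERDICT (by name: the statement is the Claim_ definition above) =====
theorem glob_to_regex_py_spec : Claim_equal_glob_to_regex_py := by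
  intro pattern _
  unfold Spec_glob_to_regex_py glob_to_regex_py glob_to_regex_py_alt
  rw [globAgo_eq_tokSub pattern.toList.length pattern.toList 0 (by omega)]
  simp
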